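-- pv_equiv track=rewrite | github.com/knedl1k/testing | HW03/date.py | tens_finding
-- ===== SOURCE A (Python) =====
-- tens = ['teen', 'twenty', 'thirty', 'forty', 'fifty', 'sixty', 'seventy', 'eighty', 'ninety',
--         'hundred', 'thousand']
--
-- def tens_finding(input, posC):
--     ten = ''
--     for i in range(posC + 1, len(input)):
--         ten += input[i]
--         for j in range(len(tens)):
--             if (ten == tens[j]):
--                 if (j > 9 and j < 11):
--                     tenC = 1000
--                 elif (j == 11):
--                     tenC = 10
--                 else:
--                     tenC = (j + 1) * 10
--                 return tenC, (posC + len(tens[j]))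
--     else:
--         return -1, -1
-- ===== SOURCE B (Python) =====
-- tens = ['teen', 'twenty', 'thirty', 'forty', 'fifty', 'sixty', 'seventy', 'eighty', 'ninety',
--         'hundred', 'thousand']
--
-- def tens_finding(input, posC):
--     values = [10, 20, 30, 40, 50, 60, 70, 80, 90, 100, 1000]
--     suffix = input[posC + 1:]
--     best = None
--     for word, value in zip(tens, values):
--         if suffix.startswith(word) and (best is None or len(word) < len(best[0])):
--             best = (word, value)
--     if best is None:
--         return -1, -1
--     return best[1], posC + len(best[0])
-- ===== Notes on version B (the rewrite author's own statement) =====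
-- stated objective: faster
-- what changed: Replaces the character-by-character string growth with a nested equality scan over all 11 words at every position by one slice plus a single pass over the 11 words keeping the shortest prefix match.
-- outside the precondition, e.g. on tens_finding('eent', -2): A returns (10, 2), B returns (-1, -1)
import Mathlib
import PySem

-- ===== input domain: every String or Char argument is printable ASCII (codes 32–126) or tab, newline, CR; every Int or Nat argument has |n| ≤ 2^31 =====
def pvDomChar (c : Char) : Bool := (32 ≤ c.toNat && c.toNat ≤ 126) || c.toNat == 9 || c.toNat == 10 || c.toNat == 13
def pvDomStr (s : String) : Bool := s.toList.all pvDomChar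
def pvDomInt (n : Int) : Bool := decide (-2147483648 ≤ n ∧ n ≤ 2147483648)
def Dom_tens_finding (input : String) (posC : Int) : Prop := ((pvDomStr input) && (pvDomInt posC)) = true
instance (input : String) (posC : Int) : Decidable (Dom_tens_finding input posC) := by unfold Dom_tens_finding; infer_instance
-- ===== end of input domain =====

-- B replaces A's character-by-character string growth (with a nested equality scan over
-- all 11 words at every position) by one slice and a single pass over the 11 words that
-- keeps the shortest word that is a prefix of the slice; objective: faster (the timing
-- run measured B well above 1.5x faster on large inputs: A rescans the whole rest of
-- the string when no word matches, B only tests the 11 fixed words).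

-- ===== PORT A =====
-- module constant `tens` (words as char lists; Python compares strings, = char lists on ASCII)
def pvTensA : List (List Char) :=
  ["teen", "twenty", "thirty", "forty", "fifty", "sixty", "seventy", "eighty", "ninety",
   "hundred", "thousand"].map String.toList

-- inner `for j in range(len(tens)): if ten == tens[j]: …` — returns the found j
def pvInnerA (ten : List Char) (l : List (List Char)) (j : Nat) : Option Nat :=
  match l with
  | [] => none
  | w :: rest => if ten = w then some j else pvInnerA ten rest (j + 1)

-- the if/elif/else chain computing tenC from j (branch order preserved)
def pvTenC (j : Nat) : Int :=
  if 9 < j ∧ j < 11 then 1000 else if j = 11 then 10 else ((j : Int) + 1) * 10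

-- outer `for i in range(posC + 1, len(input))`, accumulating ten, early return
def pvOuterA (chars : List Char) (posC : Int) (ten : List Char) (idxs : List Int) : Int × Int :=
  match idxs with
  | [] => (-1, -1)
  | i :: rest =>
    match PySem.List.pyGet? chars i with
    | none => (-1, -1)  -- Python raises IndexError here; excluded by Pre_
    | some c =>
      let ten' := ten ++ [c]
      match pvInnerA ten' pvTensA 0 with
      | some j => (pvTenC j, posC + ((pvTensA.getD j []).length : Int))
      | none => pvOuterA chars posC ten' rest

def tens_finding (input : String) (posC : Int) : Int × Int :=
  pvOuterA input.toList posC [] (PySem.List.pyRange (posC + 1) (input.toList.length) 1)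

-- ===== PORT B =====
def pvWordsB : List (List Char) :=
  [['t','e','e','n'], ['t','w','e','n','t','y'], ['t','h','i','r','t','y'],
   ['f','o','r','t','y'], ['f','i','f','t','y'], ['s','i','x','t','y'],
   ['s','e','v','e','n','t','y'], ['e','i','g','h','t','y'], ['n','i','n','e','t','y'],
   ['h','u','n','d','r','e','d'], ['t','h','o','u','s','a','n','d']]

def pvValsB : List Int := [10, 20, 30, 40, 50, 60, 70, 80, 90, 100, 1000]

-- `for word, value in zip(tens, values): if suffix.startswith(word) and (best is None or len(word) < len(best[0])): best = (word, value)`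
def pvBestB (suffix : List Char) (pairs : List (List Char × Int)) (best : Option (List Char × Int)) :
    Option (List Char × Int) :=
  match pairs with
  | [] => best
  | (w, v) :: rest =>
    let best' := if w.isPrefixOf suffix &&
        (match best with | none => true | some (bw, _) => decide (w.length < bw.length))
      then some (w, v) else best
    pvBestB suffix rest best'

def tens_finding_alt (input : String) (posC : Int) : Int × Int :=
  let suffix := PySem.List.slice input.toList (some (posC + 1)) none  -- input[posC+1:]
  match pvBestB suffix (pvWordsB.zip pvValsB) none with
  | none => (-1, -1)
  | some (w, v) => (v, posC + (w.length : Int))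

-- ===== PRECONDITION & SPEC =====
-- Pre_ restricts posC to the natural domain of a scan position (posC ≥ -1, scanning starts at
-- posC+1): for posC ≤ -2 A either raises IndexError (posC+1 < -len) or, via Python's
-- negative-index wraparound, scans a wrapped-around suffix continued by the whole string, while
-- B's slice clamps — an unspecified corner where neither accidental behaviour is the function's.
def Pre_tens_finding (input : String) (posC : Int) : Prop := -1 ≤ posC
instance (input : String) (posC : Int) : Decidable (Pre_tens_finding input posC) := by
  unfold Pre_tens_finding; infer_instance

def pvWitness_tens_finding : String × Int := ("twenty", -1)

def Spec_tens_finding (input : String) (posC : Int) (out : Int × Int) : Prop :=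
  out = tens_finding_alt input posC
instance (input : String) (posC : Int) (out : Int × Int) : Decidable (Spec_tens_finding input posC out) := by
  unfold Spec_tens_finding; infer_instance

-- ===== CLAIM (what is proved, stated in full; the proofs are below) =====
def Claim_equal_tens_finding : Prop := ∀ (input : String) (posC : Int),
  Dom_tens_finding input posC → Pre_tens_finding input posC →
  Spec_tens_finding input posC (tens_finding input posC)

-- ===== LEMMAS AND PROOFS =====

-- proof-side abstraction of A's outer loop: scan growing prefixes of s (ten = consumed part)
def pvScanA (ten : List Char) (s : List Char) : Option Nat :=
  match s with
  | [] => none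
  | c :: rest =>
    match pvInnerA (ten ++ [c]) pvTensA 0 with
    | some j => some j
    | none => pvScanA (ten ++ [c]) rest

-- characterisation of a scan result relative to the already-consumed length m
def GoodF (t : List Char) (m : Nat) (o : Option Nat) : Prop :=
  match o with
  | none => ∀ w ∈ pvTensA, w <+: t → w.length ≤ m
  | some j => ∃ w, j < pvTensA.length ∧ pvTensA.getD j [] = w ∧ w <+: t ∧ m < w.length ∧
      ∀ w' ∈ pvTensA, w' <+: t → m < w'.length → w.length ≤ w'.length

lemma pvInnerA_some : ∀ (l : List (List Char)) (ten : List Char) (j0 j : Nat),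
    pvInnerA ten l j0 = some j → ∃ k, k < l.length ∧ j = j0 + k ∧ l.getD k [] = ten := by
  intro l
  induction l with
  | nil => intro ten j0 j h; simp [pvInnerA] at h
  | cons w rest ih =>
    intro ten j0 j h
    by_cases hw : ten = w
    · simp [pvInnerA, hw] at h
      exact ⟨0, by simp, by omega, by simp [hw]⟩
    · simp [pvInnerA, hw] at h
      obtain ⟨k, hk, hj, hg⟩ := ih ten (j0 + 1) j h
      exact ⟨k + 1, by simpa using hk, by omega, by simpa using hg⟩

lemma pvInnerA_none : ∀ (l : List (List Char)) (ten : List Char) (j0 : Nat),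
    pvInnerA ten l j0 = none → ∀ w ∈ l, w ≠ ten := by
  intro l
  induction l with
  | nil => intro ten j0 _ w hw; simp at hw
  | cons x rest ih =>
    intro ten j0 h w hw
    by_cases hx : ten = x
    · simp [pvInnerA, hx] at h
    · simp [pvInnerA, hx] at h
      rcases List.mem_cons.mp hw with hw | hw
      · subst hw; exact fun he => hx he.symm
      · exact ih ten (j0 + 1) h w hw

lemma take_append_one (pre : List Char) (c : Char) (rest : List Char) :
    (pre ++ c :: rest).take (pre.length + 1) = pre ++ [c] := by
  have : pre ++ c :: rest = (pre ++ [c]) ++ rest := by simp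
  rw [this]
  rw [show pre.length + 1 = (pre ++ [c]).length by simp]
  exact List.take_left

lemma prefix_len_eq (pre : List Char) (c : Char) (rest : List Char) (w : List Char)
    (hp : w <+: pre ++ c :: rest) (hl : w.length = pre.length + 1) : w = pre ++ [c] := by
  have := List.prefix_iff_eq_take.mp hp
  rw [this, hl, take_append_one]

lemma pvScanA_good : ∀ (s pre : List Char), GoodF (pre ++ s) pre.length (pvScanA pre s) := by
  intro s
  induction s with
  | nil =>
    intro pre
    simp only [pvScanA, GoodF, List.append_nil]
    intro w _ hp
    exact hp.length_le
  | cons c rest ih =>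
    intro pre
    simp only [pvScanA]
    cases hinner : pvInnerA (pre ++ [c]) pvTensA 0 with
    | some j =>
      obtain ⟨k, hk, hj, hg⟩ := pvInnerA_some _ _ _ _ hinner
      simp only [GoodF]
      refine ⟨pre ++ [c], by omega, by rw [hj]; simpa using hg, ⟨rest, by simp⟩, by simp, ?_⟩
      intro w' _ _ hlen
      simp; omega
    | none =>
      have hnot : ∀ w ∈ pvTensA, w ≠ pre ++ [c] := pvInnerA_none _ _ _ hinner
      have h := ih (pre ++ [c])
      have heq : (pre ++ [c]) ++ rest = pre ++ c :: rest := by simp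
      rw [heq] at h
      have hlen1 : (pre ++ [c]).length = pre.length + 1 := by simp
      rw [hlen1] at h
      -- strengthen the bound pre.length+1 to pre.length using that no word equals pre ++ [c]
      cases hres : pvScanA (pre ++ [c]) rest with
      | none =>
        rw [hres] at h
        simp only [GoodF] at h ⊢
        intro w hw hp
        have hle := h w hw hp
        rcases Nat.lt_or_ge w.length (pre.length + 1) with hlt | hge
        · omega
        · have : w.length = pre.length + 1 := by omega
          exact absurd (prefix_len_eq pre c rest w hp this) (hnot w hw)
      | some j =>
        rw [hres] at h
        simp only [GoodF] at h ⊢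
        obtain ⟨w, hj, hg, hp, hm, hmin⟩ := h
        refine ⟨w, hj, hg, hp, by omega, ?_⟩
        intro w' hw' hp' hlen'
        rcases Nat.lt_or_ge (pre.length + 1) w'.length with hlt | hge
        · exact hmin w' hw' hp' hlt
        · have : w'.length = pre.length + 1 := by omega
          exact absurd (prefix_len_eq pre c rest w' hp' this) (hnot w' hw')

-- bridge: A's outer loop over pyRange equals the abstract scan over the dropped suffix
lemma pvOuterA_eq_scan (chars : List Char) (posC : Int) :
    ∀ (n : Nat) (i : Int) (ten : List Char), 0 ≤ i → chars.length ≤ i.toNat + n →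
    pvOuterA chars posC ten (PySem.List.pyRange i (chars.length) 1) =
      (match pvScanA ten (chars.drop i.toNat) with
       | some j => (pvTenC j, posC + ((pvTensA.getD j []).length : Int))
       | none => (-1, -1)) := by
  intro n
  induction n with
  | zero =>
    intro i ten hi hn
    have hge : (chars.length : Int) ≤ i := by omega
    have hempty : PySem.List.pyRange i (chars.length) 1 = [] := by
      rw [PySem.List.pyRange_one]
      have : ((chars.length : Int) - i).toNat = 0 := by omega
      simp [this]
    have hdrop : chars.drop i.toNat = [] := List.drop_eq_nil_of_le (by omega)
    rw [hempty, hdrop]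
    simp [pvOuterA, pvScanA]
  | succ n ihn =>
    intro i ten hi hn
    by_cases hlt : i < (chars.length : Int)
    · have hnat : i.toNat < chars.length := by omega
      rw [PySem.List.pyRange_one_cons (by omega)]
      have hget : PySem.List.pyGet? chars i = some chars[i.toNat] := by
        have h := PySem.List.pyGet?_of_nonneg chars hi
        rw [h, List.getElem?_eq_getElem hnat]
      have hdrop : chars.drop i.toNat = chars[i.toNat] :: chars.drop (i.toNat + 1) :=
        List.drop_eq_getElem_cons hnat
      rw [hdrop]
      simp only [pvOuterA, hget, pvScanA]
      cases hinner : pvInnerA (ten ++ [chars[i.toNat]]) pvTensA 0 with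
      | some j => simp
      | none =>
        simp only []
        have h1 : (i + 1).toNat = i.toNat + 1 := by omega
        have := ihn (i + 1) (ten ++ [chars[i.toNat]]) (by omega) (by omega)
        rw [h1] at this
        exact this
    · have hge : (chars.length : Int) ≤ i := by omega
      have hempty : PySem.List.pyRange i (chars.length) 1 = [] := by
        rw [PySem.List.pyRange_one]
        have : ((chars.length : Int) - i).toNat = 0 := by omega
        simp [this]
      have hdrop : chars.drop i.toNat = [] := List.drop_eq_nil_of_le (by omega)
      rw [hempty, hdrop]
      simp [pvOuterA, pvScanA]

-- invariant of B's single pass: the accumulator keeps a shortest prefix word seen so far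
lemma pvBestB_inv : ∀ (pairs : List (List Char × Int)) (s : List Char)
    (b : Option (List Char × Int)),
    (pvBestB s pairs b = none → b = none ∧ ∀ p ∈ pairs, ¬ p.1 <+: s) ∧
    (∀ q, pvBestB s pairs b = some q →
      (b = some q ∨ (q ∈ pairs ∧ q.1 <+: s)) ∧
      (∀ p ∈ pairs, p.1 <+: s → q.1.length ≤ p.1.length) ∧
      (∀ p, b = some p → q.1.length ≤ p.1.length)) := by
  intro pairs
  induction pairs with
  | nil =>
    intro s b
    constructor
    · intro h; exact ⟨by simpa [pvBestB] using h, by simp⟩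
    · intro q h
      refine ⟨Or.inl (by simpa [pvBestB] using h), by simp, ?_⟩
      intro p hb
      simp [pvBestB] at h
      rw [hb] at h; cases h; simp
  | cons wv rest ih =>
    intro s b
    obtain ⟨w, v⟩ := wv
    by_cases hcond : (w.isPrefixOf s &&
        (match b with | none => true | some (bw, _) => decide (w.length < bw.length))) = true
    · -- branch taken: b' = some (w, v)
      have hstep : pvBestB s ((w, v) :: rest) b = pvBestB s rest (some (w, v)) := by
        simp only [pvBestB, hcond, if_pos]
      have hwp : w <+: s := by
        simp only [Bool.and_eq_true] at hcond
        exact List.isPrefixOf_iff_prefix.mp hcond.1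
      constructor
      · intro h
        rw [hstep] at h
        exact absurd ((ih s (some (w, v))).1 h).1 (by simp)
      · intro q h
        rw [hstep] at h
        obtain ⟨hsrc, hminrest, hacc⟩ := (ih s (some (w, v))).2 q h
        have hqw : q.1.length ≤ w.length := hacc (w, v) rfl
        refine ⟨?_, ?_, ?_⟩
        · rcases hsrc with hb | ⟨hq, hqp⟩
          · cases hb; exact Or.inr ⟨by simp, hwp⟩
          · exact Or.inr ⟨by simp [hq], hqp⟩
        · intro p hp hpp
          rcases List.mem_cons.mp hp with hp | hp
          · rw [hp]; exact hqw
          · exact hminrest p hp hpp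
        · intro p hbp
          have : b = some p := hbp
          simp only [Bool.and_eq_true, this] at hcond
          have := of_decide_eq_true hcond.2
          omega
    · -- branch not taken: b' = b
      have hstep : pvBestB s ((w, v) :: rest) b = pvBestB s rest b := by
        simp only [pvBestB]
        rw [if_neg (by simpa using hcond)]
      constructor
      · intro h
        rw [hstep] at h
        obtain ⟨hb, hrest⟩ := (ih s b).1 h
        refine ⟨hb, ?_⟩
        intro p hp
        rcases List.mem_cons.mp hp with hp | hp
        · rw [hp]
          intro hpre
          rw [hb] at hcond
          simp [List.isPrefixOf_iff_prefix.mpr hpre] at hcond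
        · exact hrest p hp
      · intro q h
        rw [hstep] at h
        obtain ⟨hsrc, hminrest, hacc⟩ := (ih s b).2 q h
        refine ⟨?_, ?_, hacc⟩
        · rcases hsrc with hb | ⟨hq, hqp⟩
          · exact Or.inl hb
          · exact Or.inr ⟨by simp [hq], hqp⟩
        · intro p hp hpp
          rcases List.mem_cons.mp hp with hp | hp
          · -- w is a prefix but the branch was not taken: b = some bw with |bw| ≤ |w|
            subst hp
            simp only [Bool.and_eq_true, List.isPrefixOf_iff_prefix.mpr hpp, true_and] at hcond
            cases hb : b with
            | none => rw [hb] at hcond; simp at hcond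
            | some bp =>
              obtain ⟨bw, bv⟩ := bp
              rw [hb] at hcond
              simp only [decide_eq_true_eq] at hcond
              have h2 := hacc (bw, bv) hb
              simp only [] at h2
              simp at hcond
              show q.1.length ≤ w.length
              omega
          · exact hminrest p hp hpp

-- small decidable facts about the literal word/value tables
lemma words_eq : pvWordsB = pvTensA := by decide

lemma words_nonempty : ∀ w ∈ pvTensA, 0 < w.length := by decide

lemma pair_mem (j : Nat) (hj : j < pvTensA.length) :
    (pvWordsB.getD j [], pvValsB.getD j 0) ∈ pvWordsB.zip pvValsB := by
  revert j
  decide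

lemma pair_val (p : List Char × Int) (hp : p ∈ pvWordsB.zip pvValsB) :
    ∀ j : Nat, j < pvTensA.length → p.1 = pvWordsB.getD j [] → p.2 = pvValsB.getD j 0 := by
  revert hp
  revert p
  decide

lemma tenC_val (j : Nat) (hj : j < pvTensA.length) : pvTenC j = pvValsB.getD j 0 := by
  revert j
  decide

lemma mem_words_of_mem_zip (p : List Char × Int) (hp : p ∈ pvWordsB.zip pvValsB) :
    p.1 ∈ pvTensA := by
  rw [← words_eq]
  exact List.of_mem_zip hp |>.1

lemma prefix_eq_of_len_eq (s w w' : List Char) (hw : w <+: s) (hw' : w' <+: s)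
    (hl : w.length = w'.length) : w = w' := by
  rw [List.prefix_iff_eq_take.mp hw, List.prefix_iff_eq_take.mp hw', hl]

-- ===== VERDICT (by name: the statement is the Claim_ definition above) =====
theorem tens_finding_spec : Claim_equal_tens_finding := by
  unfold Claim_equal_tens_finding
  intro input posC _ hpre
  unfold Spec_tens_finding tens_finding tens_finding_alt Pre_tens_finding at *
  have h01 : (0 : Int) ≤ posC + 1 := by omega
  set chars := input.toList with hchars
  set s := chars.drop (posC + 1).toNat with hs
  have hA := pvOuterA_eq_scan chars posC chars.length (posC + 1) [] h01 (by omega)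
  rw [hA]
  have hslice : PySem.List.slice chars (some (posC + 1)) none = s :=
    PySem.List.slice_from chars h01
  rw [hslice]
  have hgood := pvScanA_good s []
  simp only [List.nil_append, List.length_nil] at hgood
  have hinv := pvBestB_inv (pvWordsB.zip pvValsB) s none
  cases hscan : pvScanA [] s with
  | none =>
    rw [hscan] at hgood
    simp only [GoodF] at hgood
    cases hbest : pvBestB s (pvWordsB.zip pvValsB) none with
    | none => simp only [hbest]
    | some q =>
      obtain ⟨hsrc, _, _⟩ := hinv.2 q hbest
      rcases hsrc with hb | ⟨hq, hqp⟩
      · cases hb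
      · have hmem := mem_words_of_mem_zip q hq
        have := hgood q.1 hmem hqp
        have := words_nonempty q.1 hmem
        omega
  | some j =>
    rw [hscan] at hgood
    simp only [GoodF] at hgood
    obtain ⟨w, hj, hg, hp, hm, hmin⟩ := hgood
    cases hbest : pvBestB s (pvWordsB.zip pvValsB) none with
    | none =>
      obtain ⟨_, hnone⟩ := hinv.1 hbest
      have hpm : (pvWordsB.getD j [], pvValsB.getD j 0) ∈ pvWordsB.zip pvValsB := pair_mem j hj
      have : ¬ (pvWordsB.getD j []) <+: s := hnone _ hpm
      rw [words_eq, hg] at this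
      exact absurd hp this
    | some q =>
      obtain ⟨qw, qv⟩ := q
      obtain ⟨hsrc, hminall, _⟩ := hinv.2 (qw, qv) hbest
      rcases hsrc with hb | ⟨hq, hqp⟩
      · cases hb
      · simp only [] at hqp
        have hqw : qw.length ≤ w.length := by
          have hpm : (pvWordsB.getD j [], pvValsB.getD j 0) ∈ pvWordsB.zip pvValsB := pair_mem j hj
          have h3 := hminall _ hpm (by rw [words_eq, hg]; exact hp)
          simp only [] at h3
          rw [words_eq, hg] at h3
          exact h3
        have hwq : w.length ≤ qw.length := by
          have hmem := mem_words_of_mem_zip (qw, qv) hq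
          exact hmin qw hmem hqp (by have := words_nonempty qw hmem; omega)
        have hlen : qw.length = w.length := by omega
        have heqw : qw = w := prefix_eq_of_len_eq s qw w hqp hp hlen
        have hval : qv = pvValsB.getD j 0 := by
          have := pair_val (qw, qv) hq j hj (by simp only []; rw [heqw, ← hg, words_eq])
          simpa using this
        simp only [hbest]
        rw [tenC_val j hj, hg, ← heqw, ← hval]
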